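-- pv_equiv track=rewrite | github.com/Adam-Jimenez/binarysearch-editorials | Partition String.py | solve
-- ===== SOURCE A (Python) =====
-- def solve(s):
--     left={}
--     right={}
--     for i,c in enumerate(s):
--         if c not in left:
--             left[c]=i
--         right[c]=i
--     intervals=[]
--     seen=set()
--     for c in s:
--         if c not in seen:
--             seen.add(c)
--             intervals.append([left[c],right[c]])
--     stk=[]
--     for start,e in intervals:
--         if not stk or start>stk[-1][1]:
--             stk.append([start,e])
--         else:
--             stk[-1][1]=max(e,stk[-1][1])
--     ans=[]
--     for start,e in stk:
--         ans.append(e-start+1)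
--     return ans
-- ===== SOURCE B (Python) =====
-- def solve(s):
--     last = {}
--     for i, c in enumerate(s):
--         last[c] = i
--     ans = []
--     start = 0
--     end = -1
--     for i, c in enumerate(s):
--         end = max(end, last[c])
--         if i == end:
--             ans.append(end - start + 1)
--             start = i + 1
--     return ans
-- ===== Notes on version B (the rewrite author's own statement) =====
-- stated objective: simpler
-- what changed: B replaces A's left/right maps, explicit interval list and stack-merge by a single greedy scan: one last-occurrence map, then one pass keeping a running prefix-max of last occurrences and cutting a segment whenever the index reaches it.
import Mathlib
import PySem

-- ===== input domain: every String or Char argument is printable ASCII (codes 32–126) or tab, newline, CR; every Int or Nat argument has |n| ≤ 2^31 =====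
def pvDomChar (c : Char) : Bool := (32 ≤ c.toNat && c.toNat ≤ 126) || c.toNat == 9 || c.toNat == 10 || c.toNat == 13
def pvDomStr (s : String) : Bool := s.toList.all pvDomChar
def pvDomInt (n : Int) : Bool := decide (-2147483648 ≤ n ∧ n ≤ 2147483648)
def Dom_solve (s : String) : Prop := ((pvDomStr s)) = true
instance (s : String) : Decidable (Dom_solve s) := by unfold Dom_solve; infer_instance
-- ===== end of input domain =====

-- B replaces A's left/right maps, interval list and stack-merge by one greedy scan
-- with a last-occurrence map and a running prefix maximum (objective: simpler).

-- ===== PORT A =====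
-- the stack-merge step of A's third loop ('if not stk or start > stk[-1][1]: push else merge into top')
def pvMergeStep (stk : List (Int × Int)) (p : Int × Int) : List (Int × Int) :=
  match stk.getLast? with
  | none => stk ++ [p]
  | some top => if top.2 < p.1 then stk ++ [p] else stk.dropLast ++ [(top.1, max p.2 top.2)]

def solve (s : String) : List Int :=
  let cs := s.toList
  -- loop 1: left/right first/last-occurrence dicts, one pass over enumerate(s)
  let lr := (PySem.List.enumerate cs 0).foldl
      (fun (lr : PySem.Dict Char Int × PySem.Dict Char Int) p =>
        (if lr.1.contains p.2 then lr.1 else lr.1.insert p.2 p.1, lr.2.insert p.2 p.1))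
      (PySem.Dict.empty, PySem.Dict.empty)
  -- loop 2: intervals for each char at its first occurrence (left[c]/right[c] always present)
  let ivseen := cs.foldl
      (fun (st : List (Int × Int) × PySem.Set Char) c =>
        if PySem.Set.contains st.2 c then st
        else (st.1 ++ [(lr.1.getD c 0, lr.2.getD c 0)], PySem.Set.add st.2 c))
      ([], PySem.Set.empty)
  -- loop 3: merge overlapping intervals on a stack
  let stk := ivseen.1.foldl pvMergeStep []
  -- loop 4: lengths
  stk.foldl (fun ans q => ans ++ [q.2 - q.1 + 1]) []

-- ===== PORT B =====
def solve_alt (s : String) : List Int :=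
  let cs := s.toList
  -- last-occurrence map
  let last := (PySem.List.enumerate cs 0).foldl
      (fun (d : PySem.Dict Char Int) (p : Int × Char) => d.insert p.2 p.1) PySem.Dict.empty
  -- single greedy scan (ans, start, end)
  let fin := (PySem.List.enumerate cs 0).foldl
      (fun (st : List Int × Int × Int) (p : Int × Char) =>
        let e := max st.2.2 (last.getD p.2 0)
        if p.1 = e then (st.1 ++ [e - st.2.1 + 1], p.1 + 1, e) else (st.1, st.2.1, e))
      ([], 0, -1)
  fin.1

-- ===== PRECONDITION & SPEC =====
def Spec_solve (s : String) (out : List Int) : Prop := out = solve_alt s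
instance (s : String) (out : List Int) : Decidable (Spec_solve s out) := by unfold Spec_solve; infer_instance

-- ===== CLAIM (what is proved, stated in full; the proofs are below) =====
def Claim_equal_solve : Prop := ∀ (s : String), Dom_solve s → Spec_solve s (solve s)

-- ===== LEMMAS AND PROOFS =====

def pvLeftF (d : PySem.Dict Char Int) (p : Int × Char) : PySem.Dict Char Int :=
  if d.contains p.2 then d else d.insert p.2 p.1
def pvRightF (d : PySem.Dict Char Int) (p : Int × Char) : PySem.Dict Char Int :=
  d.insert p.2 p.1

lemma pvLeft_untouched (cs : List Char) : ∀ (s : Int) (d : PySem.Dict Char Int) (c : Char),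
    d.contains c = true →
    ((PySem.List.enumerate cs s).foldl pvLeftF d).get? c = d.get? c := by
  induction cs with
  | nil => intro s d c _; simp [PySem.List.enumerate_nil]
  | cons x t ih =>
    intro s d c hc
    rw [PySem.List.enumerate_cons, List.foldl_cons]
    by_cases hdx : d.contains x = true
    · rw [show pvLeftF d (s, x) = d by simp [pvLeftF, hdx]]
      exact ih (s+1) d c hc
    · have hxc : c ≠ x := by rintro rfl; exact hdx hc
      rw [show pvLeftF d (s, x) = d.insert x s by simp [pvLeftF, hdx]]
      rw [ih (s+1) _ c (by simp [PySem.Dict.contains_insert, hc])]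
      exact PySem.Dict.get?_insert_of_ne d s hxc

lemma pvLeft_first (cs : List Char) : ∀ (s : Int) (d : PySem.Dict Char Int) (c : Char),
    d.contains c = false → c ∈ cs →
    ∃ k, ∃ h : k < cs.length, cs[k] = c ∧ c ∉ cs.take k ∧
      ((PySem.List.enumerate cs s).foldl pvLeftF d).get? c = some (s + k) := by
  induction cs with
  | nil => intro s d c _ hc; simp at hc
  | cons x t ih =>
    intro s d c hdc hc
    rw [PySem.List.enumerate_cons, List.foldl_cons]
    by_cases hx : x = c
    · subst hx
      rw [show pvLeftF d (s, x) = d.insert x s by simp [pvLeftF, hdc]]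
      refine ⟨0, by simp, by simp, by simp, ?_⟩
      rw [pvLeft_untouched t (s+1) _ x (by simp [PySem.Dict.contains_insert])]
      simp [PySem.Dict.get?_insert_self]
    · have hct : c ∈ t := by rcases List.mem_cons.mp hc with h | h; exact absurd h.symm hx; exact h
      have hd1 : (pvLeftF d (s, x)).contains c = false := by
        by_cases hdx : d.contains x = true
        · simp [pvLeftF, hdx, hdc]
        · simp only [pvLeftF]
          simp [hdx, PySem.Dict.contains_insert, hdc, Ne.symm hx]
      obtain ⟨k, hk, hck, hnt, hget⟩ := ih (s+1) _ c hd1 hct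
      refine ⟨k+1, by simpa using hk, by simpa using hck, ?_, ?_⟩
      · rw [List.take_succ_cons]
        simp only [List.mem_cons, not_or]
        exact ⟨Ne.symm hx, hnt⟩
      · rw [hget]; congr 1; push_cast; ring

lemma pvRight_untouched (cs : List Char) : ∀ (s : Int) (d : PySem.Dict Char Int) (c : Char),
    c ∉ cs →
    ((PySem.List.enumerate cs s).foldl pvRightF d).get? c = d.get? c := by
  induction cs with
  | nil => intro s d c _; simp [PySem.List.enumerate_nil]
  | cons x t ih =>
    intro s d c hc
    rw [PySem.List.enumerate_cons, List.foldl_cons]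
    have hcx : c ≠ x := fun h => hc (h ▸ List.mem_cons_self)
    rw [ih (s+1) _ c (fun h => hc (List.mem_cons_of_mem _ h))]
    exact PySem.Dict.get?_insert_of_ne d s hcx

lemma pvRight_last (cs : List Char) : ∀ (s : Int) (d : PySem.Dict Char Int) (c : Char),
    c ∈ cs →
    ∃ k, ∃ h : k < cs.length, cs[k] = c ∧ (∀ j (hj : j < cs.length), cs[j] = c → j ≤ k) ∧
      ((PySem.List.enumerate cs s).foldl pvRightF d).get? c = some (s + k) := by
  induction cs with
  | nil => intro s d c hc; simp at hc
  | cons x t ih =>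
    intro s d c hc
    rw [PySem.List.enumerate_cons, List.foldl_cons]
    by_cases hct : c ∈ t
    · obtain ⟨k, hk, hck, hmax, hget⟩ := ih (s+1) (pvRightF d (s, x)) c hct
      refine ⟨k+1, by simpa using hk, by simpa using hck, ?_, ?_⟩
      · intro j hj hcj
        cases j with
        | zero => omega
        | succ j => have := hmax j (by simpa using hj) (by simpa using hcj); omega
      · rw [hget]; congr 1; push_cast; ring
    · have hxc : x = c := by rcases List.mem_cons.mp hc with h | h; exact h.symm; exact absurd h hct
      subst hxc
      refine ⟨0, by simp, by simp, ?_, ?_⟩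
      · intro j hj hcj
        cases j with
        | zero => omega
        | succ j =>
          have hjt : j < t.length := by simpa using hj
          have hxe : t[j] = x := by simpa using hcj
          exact absurd (hxe ▸ List.getElem_mem hjt) hct
      · rw [pvRight_untouched t (s+1) _ x hct]
        simp [pvRightF, PySem.Dict.get?_insert_self]

lemma pvFirstUnique (cs : List Char) (k k' : Nat) (hk : k < cs.length) (hk' : k' < cs.length)
    (he : cs[k] = cs[k']) (h1 : cs[k] ∉ cs.take k) (h2 : cs[k'] ∉ cs.take k') : k = k' := by
  rcases lt_trichotomy k k' with h | h | h
  · exfalso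
    apply h2
    rw [← he]
    have hlen : k < (cs.take k').length := by simp [List.length_take]; omega
    have : (cs.take k')[k] = cs[k] := List.getElem_take
    exact this ▸ List.getElem_mem hlen
  · exact h
  · exfalso
    apply h1
    rw [he]
    have hlen : k' < (cs.take k).length := by simp [List.length_take]; omega
    have : (cs.take k)[k'] = cs[k'] := List.getElem_take
    exact this ▸ List.getElem_mem hlen

def pvA2 (lv rv : Char → Int) (l : List Char) : List (Int × Int) × PySem.Set Char :=
  l.foldl
    (fun (st : List (Int × Int) × PySem.Set Char) c =>
      if PySem.Set.contains st.2 c then st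
      else (st.1 ++ [(lv c, rv c)], PySem.Set.add st.2 c))
    ([], PySem.Set.empty)
def pvB2 (rv : Char → Int) (l : List (Int × Char)) : List Int × Int × Int :=
  l.foldl
    (fun (st : List Int × Int × Int) (p : Int × Char) =>
      let e := max st.2.2 (rv p.2)
      if p.1 = e then (st.1 ++ [e - st.2.1 + 1], p.1 + 1, e) else (st.1, st.2.1, e))
    ([], 0, -1)
def pvLenF (q : Int × Int) : Int := q.2 - q.1 + 1

lemma pvSetContains (l : List Char) (c : Char) :
    PySem.Set.contains (PySem.Set.ofList l) c = decide (c ∈ l) := by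
  simp [PySem.Set.contains, PySem.Set.mem_ofList]

lemma pvOfList_concat (l : List Char) (c : Char) :
    PySem.Set.ofList (l ++ [c]) = PySem.Set.add (PySem.Set.ofList l) c := by
  simp [PySem.Set.ofList_eq_foldl, List.foldl_append]

lemma pvAdd_mem (l : List Char) (c : Char) (h : c ∈ l) :
    PySem.Set.add (PySem.Set.ofList l) c = PySem.Set.ofList l := by
  simp [PySem.Set.add, pvSetContains, h]

lemma pvB2_concat (rv : Char → Int) (l : List (Int × Char)) (p : Int × Char) :
    pvB2 rv (l ++ [p]) =
      (if p.1 = max (pvB2 rv l).2.2 (rv p.2)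
       then ((pvB2 rv l).1 ++ [max (pvB2 rv l).2.2 (rv p.2) - (pvB2 rv l).2.1 + 1],
             p.1 + 1, max (pvB2 rv l).2.2 (rv p.2))
       else ((pvB2 rv l).1, (pvB2 rv l).2.1, max (pvB2 rv l).2.2 (rv p.2))) := by
  simp only [pvB2, List.foldl_append, List.foldl_cons, List.foldl_nil]

lemma pvA2_concat (lv rv : Char → Int) (l : List Char) (c : Char) :
    pvA2 lv rv (l ++ [c]) =
      (if PySem.Set.contains (pvA2 lv rv l).2 c then pvA2 lv rv l
       else ((pvA2 lv rv l).1 ++ [(lv c, rv c)], PySem.Set.add (pvA2 lv rv l).2 c)) := by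
  simp only [pvA2, List.foldl_append, List.foldl_cons, List.foldl_nil]

lemma pvInv (cs : List Char) (lv rv : Char → Int)
    (Hub : ∀ j (h : j < cs.length), (j : Int) ≤ rv cs[j] ∧ rv cs[j] ≤ (cs.length : Int) - 1)
    (Hlv : ∀ k (h : k < cs.length), cs[k] ∉ cs.take k → lv cs[k] = (k : Int)) :
    ∀ k, 1 ≤ k → k ≤ cs.length →
    (pvA2 lv rv (cs.take k)).2 = PySem.Set.ofList (cs.take k) ∧
    (∀ j (hj : j < cs.length), j < k →
        rv cs[j] ≤ (pvB2 rv (PySem.List.enumerate (cs.take k) 0)).2.2) ∧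
    (k : Int) - 1 ≤ (pvB2 rv (PySem.List.enumerate (cs.take k) 0)).2.2 ∧
    (pvB2 rv (PySem.List.enumerate (cs.take k) 0)).2.2 ≤ (cs.length : Int) - 1 ∧
    ∃ segs top1,
      (pvA2 lv rv (cs.take k)).1.foldl pvMergeStep []
        = segs ++ [(top1, (pvB2 rv (PySem.List.enumerate (cs.take k) 0)).2.2)] ∧
      (if (pvB2 rv (PySem.List.enumerate (cs.take k) 0)).2.2 = (k : Int) - 1
       then (pvB2 rv (PySem.List.enumerate (cs.take k) 0)).1
              = segs.map pvLenF ++ [(pvB2 rv (PySem.List.enumerate (cs.take k) 0)).2.2 - top1 + 1] ∧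
            (pvB2 rv (PySem.List.enumerate (cs.take k) 0)).2.1 = (k : Int)
       else (pvB2 rv (PySem.List.enumerate (cs.take k) 0)).1 = segs.map pvLenF ∧
            (pvB2 rv (PySem.List.enumerate (cs.take k) 0)).2.1 = top1) := by
  intro k
  induction k with
  | zero => omega
  | succ k ih =>
    intro _ hk1
    have hklt : k < cs.length := by omega
    have htake : cs.take (k+1) = cs.take k ++ [cs[k]] := by
      rw [List.take_succ, List.getElem?_eq_getElem hklt]; rfl
    have hlen : (cs.take k).length = k := by simp [List.length_take]; omega
    have hEN : PySem.List.enumerate (cs.take (k+1)) 0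
        = PySem.List.enumerate (cs.take k) 0 ++ [((k : Int), cs[k])] := by
      rw [htake, PySem.List.enumerate_append, hlen, PySem.List.enumerate_cons,
        PySem.List.enumerate_nil]
      norm_num
    rcases Nat.eq_or_lt_of_le (Nat.one_le_iff_ne_zero.mpr (Nat.succ_ne_zero k)) with h1 | h1
    · -- base case k+1 = 1
      have hk0 : k = 0 := by omega
      subst hk0
      have h0 : (0 : Int) ≤ rv cs[0] := (Hub 0 hklt).1
      have h0' : rv cs[0] ≤ (cs.length : Int) - 1 := (Hub 0 hklt).2
      have hl0 : lv cs[0] = 0 := by simpa using Hlv 0 hklt (by simp)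
      rw [show cs.take 1 = [cs[0]] by rw [htake]; simp]
      have hmax : max (-1 : Int) (rv cs[0]) = rv cs[0] := max_eq_right (by omega)
      have hA1 : pvA2 lv rv [cs[0]] = ([((0:Int), rv cs[0])], [cs[0]]) := by
        simp [pvA2, PySem.Set.contains, PySem.Set.empty, PySem.Set.add, hl0]
      have hseen1 : PySem.Set.ofList [cs[0]] = [cs[0]] := by
        simp [PySem.Set.ofList_eq_foldl, PySem.Set.add, PySem.Set.contains, PySem.Set.empty]
      by_cases hz : rv cs[0] = (0 : Int)
      · have hB1 : pvB2 rv (PySem.List.enumerate [cs[0]] 0) = ([1], 1, 0) := by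
          simp [pvB2, PySem.List.enumerate_cons, PySem.List.enumerate_nil, hmax, hz]
        rw [hA1, hB1, hseen1]
        refine ⟨rfl, ?_, ?_, ?_, [], 0, ?_, ?_⟩
        · intro j hj hj1
          have hj0 : j = 0 := by omega
          subst hj0
          simp only []
          omega
        · simp only []; omega
        · simp only []; omega
        · simp [pvMergeStep, hz]
        · norm_num
      · have hB1 : pvB2 rv (PySem.List.enumerate [cs[0]] 0) = (([], 0, rv cs[0]) : List Int × Int × Int) := by
          simp only [pvB2, PySem.List.enumerate_cons, PySem.List.enumerate_nil,
            List.foldl_cons, List.foldl_nil, hmax]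
          rw [if_neg (fun h => hz h.symm)]
        rw [hA1, hB1, hseen1]
        refine ⟨rfl, ?_, ?_, ?_, [], 0, ?_, ?_⟩
        · intro j hj hj1
          have hj0 : j = 0 := by omega
          subst hj0
          simp only []
          omega
        · simp only []; omega
        · simp only []; omega
        · simp [pvMergeStep]
        · rw [if_neg (by simp only []; omega)]
          exact ⟨rfl, rfl⟩
    · -- inductive step: 1 ≤ k
      obtain ⟨hseen, hmono, hlb, hub, segs, top1, hstk, hif⟩ := ih (by omega) (by omega)
      have hub2 := Hub k hklt
      have hEN' : PySem.List.enumerate (cs.take k ++ [cs[k]]) 0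
          = PySem.List.enumerate (cs.take k) 0 ++ [((k : Int), cs[k])] := by
        rw [PySem.List.enumerate_append, hlen, PySem.List.enumerate_cons,
          PySem.List.enumerate_nil]
        norm_num
      rw [htake, hEN', pvA2_concat, pvB2_concat]
      by_cases hc : cs[k] ∈ cs.take k
      · -- repeated character: A's state is unchanged, B's max is a no-op
        have hcon : PySem.Set.contains (pvA2 lv rv (cs.take k)).2 cs[k] = true := by
          rw [hseen, pvSetContains]; simpa using hc
        rw [if_pos hcon]
        obtain ⟨j, hjlt, hje⟩ := List.mem_take_iff_getElem.mp hc
        have hrv : rv cs[k] ≤ (pvB2 rv (PySem.List.enumerate (cs.take k) 0)).2.2 := by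
          rw [← hje]; exact hmono j (by omega) (by omega)
        have hmaxe : max (pvB2 rv (PySem.List.enumerate (cs.take k) 0)).2.2 (rv cs[k])
            = (pvB2 rv (PySem.List.enumerate (cs.take k) 0)).2.2 := max_eq_left hrv
        rw [hmaxe]
        have hken : (k : Int) ≤ (pvB2 rv (PySem.List.enumerate (cs.take k) 0)).2.2 :=
          le_trans hub2.1 hrv
        rw [if_neg (show ¬((pvB2 rv (PySem.List.enumerate (cs.take k) 0)).2.2 = (k : Int) - 1)
          by omega)] at hif
        by_cases hcut : ((k : Int) = (pvB2 rv (PySem.List.enumerate (cs.take k) 0)).2.2)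
        · rw [if_pos hcut]
          refine ⟨by rw [pvOfList_concat, pvAdd_mem _ _ hc, hseen], ?_, ?_, ?_,
            segs, top1, hstk, ?_⟩
          · intro j' hj' hj'1
            rcases Nat.lt_succ_iff_lt_or_eq.mp hj'1 with h | h
            · exact hmono j' hj' h
            · subst h; exact hrv
          · simp only []; omega
          · simp only []; exact hub
          · rw [if_pos (by simp only []; push_cast; omega)]
            refine ⟨?_, by simp only []; push_cast; omega⟩
            simp only []
            rw [hif.1, hif.2, ← hcut]
        · rw [if_neg hcut]
          refine ⟨by rw [pvOfList_concat, pvAdd_mem _ _ hc, hseen], ?_, ?_, ?_,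
            segs, top1, hstk, ?_⟩
          · intro j' hj' hj'1
            rcases Nat.lt_succ_iff_lt_or_eq.mp hj'1 with h | h
            · exact hmono j' hj' h
            · subst h; exact hrv
          · simp only []; omega
          · simp only []; exact hub
          · rw [if_neg (by simp only []; push_cast; omega)]
            exact hif
      · -- new character: A pushes/merges the interval (k, rv c), B extends the max
        have hcon : PySem.Set.contains (pvA2 lv rv (cs.take k)).2 cs[k] = false := by
          rw [hseen, pvSetContains]; simpa using hc
        rw [if_neg (by rw [hcon]; exact Bool.false_ne_true)]
        have hlvk : lv cs[k] = (k : Int) := Hlv k hklt hc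
        have hkrv : (k : Int) ≤ rv cs[k] := hub2.1
        have hstk' : ((pvA2 lv rv (cs.take k)).1 ++ [(lv cs[k], rv cs[k])]).foldl pvMergeStep []
            = pvMergeStep (segs ++ [(top1, (pvB2 rv (PySem.List.enumerate (cs.take k) 0)).2.2)])
                ((k : Int), rv cs[k]) := by
          rw [List.foldl_append, hstk, hlvk]
          rfl
        by_cases hen : (pvB2 rv (PySem.List.enumerate (cs.take k) 0)).2.2 = (k : Int) - 1
        · -- previous segment closed exactly at k-1: push a new interval
          rw [if_pos hen] at hif
          have hmaxr : max (pvB2 rv (PySem.List.enumerate (cs.take k) 0)).2.2 (rv cs[k])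
              = rv cs[k] := max_eq_right (by omega)
          rw [hmaxr]
          have hpush : pvMergeStep
              (segs ++ [(top1, (pvB2 rv (PySem.List.enumerate (cs.take k) 0)).2.2)])
              ((k : Int), rv cs[k])
              = (segs ++ [(top1, (pvB2 rv (PySem.List.enumerate (cs.take k) 0)).2.2)])
                ++ [((k : Int), rv cs[k])] := by
            rw [pvMergeStep, List.getLast?_concat]
            simp only []
            rw [if_pos (by omega)]
          by_cases hrk : (k : Int) = rv cs[k]
          · rw [if_pos hrk]
            refine ⟨by rw [pvOfList_concat, hseen], ?_, ?_, ?_,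
              segs ++ [(top1, (pvB2 rv (PySem.List.enumerate (cs.take k) 0)).2.2)], (k : Int),
              ?_, ?_⟩
            · intro j' hj' hj'1
              rcases Nat.lt_succ_iff_lt_or_eq.mp hj'1 with h | h
              · have := hmono j' hj' h; simp only []; omega
              · subst h; simp only []; omega
            · simp only []; omega
            · simp only []; omega
            · rw [hstk', hpush, ← hrk]
            · rw [if_pos (by simp only []; push_cast; omega)]
              constructor
              · simp only []
                rw [hif.1, hif.2, List.map_append]
                simp only [List.map_cons, List.map_nil, pvLenF, hen, List.append_assoc]
              · simp only []; push_cast; omega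
          · rw [if_neg hrk]
            refine ⟨by rw [pvOfList_concat, hseen], ?_, ?_, ?_,
              segs ++ [(top1, (pvB2 rv (PySem.List.enumerate (cs.take k) 0)).2.2)], (k : Int),
              ?_, ?_⟩
            · intro j' hj' hj'1
              rcases Nat.lt_succ_iff_lt_or_eq.mp hj'1 with h | h
              · have := hmono j' hj' h; simp only []; omega
              · subst h; simp only []; omega
            · simp only []; omega
            · simp only []; omega
            · rw [hstk', hpush]
            · rw [if_neg (by simp only []; push_cast; omega)]
              constructor
              · simp only []
                rw [hif.1, List.map_append]
                simp only [List.map_cons, List.map_nil, pvLenF, hen]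
              · exact hif.2
        · -- current segment still open: merge into the top of the stack
          rw [if_neg hen] at hif
          have hken : (k : Int) ≤ (pvB2 rv (PySem.List.enumerate (cs.take k) 0)).2.2 := by
            omega
          have hmerge : pvMergeStep
              (segs ++ [(top1, (pvB2 rv (PySem.List.enumerate (cs.take k) 0)).2.2)])
              ((k : Int), rv cs[k])
              = segs ++ [(top1,
                  max (pvB2 rv (PySem.List.enumerate (cs.take k) 0)).2.2 (rv cs[k]))] := by
            rw [pvMergeStep, List.getLast?_concat]
            simp only []
            rw [if_neg (by omega), List.dropLast_concat, max_comm]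
          by_cases hke : ((k : Int) = max (pvB2 rv (PySem.List.enumerate (cs.take k) 0)).2.2
              (rv cs[k]))
          · rw [if_pos hke]
            refine ⟨by rw [pvOfList_concat, hseen], ?_, ?_, ?_, segs, top1, ?_, ?_⟩
            · intro j' hj' hj'1
              rcases Nat.lt_succ_iff_lt_or_eq.mp hj'1 with h | h
              · have := hmono j' hj' h; simp only []; omega
              · subst h; simp only []; omega
            · simp only []; omega
            · simp only []; omega
            · rw [hstk', hmerge]
            · rw [if_pos (by simp only []; push_cast; omega)]
              constructor
              · simp only []
                rw [hif.1, hif.2, ← hke]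
              · simp only []; push_cast; omega
          · rw [if_neg hke]
            refine ⟨by rw [pvOfList_concat, hseen], ?_, ?_, ?_, segs, top1, ?_, ?_⟩
            · intro j' hj' hj'1
              rcases Nat.lt_succ_iff_lt_or_eq.mp hj'1 with h | h
              · have := hmono j' hj' h; simp only []; omega
              · subst h; simp only []; omega
            · simp only []; omega
            · simp only []; omega
            · rw [hstk', hmerge]
            · rw [if_neg (by simp only []; push_cast; omega)]
              exact hif

def pvLv (cs : List Char) (c : Char) : Int :=
  ((PySem.List.enumerate cs 0).foldl pvLeftF PySem.Dict.empty).getD c 0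
def pvRv (cs : List Char) (c : Char) : Int :=
  ((PySem.List.enumerate cs 0).foldl pvRightF PySem.Dict.empty).getD c 0

lemma solve_eq (s : String) :
    solve s = ((pvA2 (pvLv s.toList) (pvRv s.toList) s.toList).1.foldl pvMergeStep []).map
      pvLenF := by
  unfold solve
  simp only []
  rw [show (fun (lr : PySem.Dict Char Int × PySem.Dict Char Int) (p : Int × Char) =>
        (if lr.1.contains p.2 then lr.1 else lr.1.insert p.2 p.1, lr.2.insert p.2 p.1))
      = (fun (lr : PySem.Dict Char Int × PySem.Dict Char Int) (p : Int × Char) =>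
        (pvLeftF lr.1 p, pvRightF lr.2 p)) from rfl]
  rw [PySem.List.foldl_prod_mk]
  rw [show (fun (ans : List Int) (q : Int × Int) => ans ++ [q.2 - q.1 + 1])
      = (fun (acc : List Int) (x : Int × Int) => acc ++ [pvLenF x]) from rfl]
  rw [PySem.List.foldl_append_singleton_eq_map pvLenF]
  rw [show pvA2 (pvLv s.toList) (pvRv s.toList) s.toList
      = s.toList.foldl
        (fun (st : List (Int × Int) × PySem.Set Char) c =>
          if PySem.Set.contains st.2 c then st
          else (st.1 ++ [(pvLv s.toList c, pvRv s.toList c)], PySem.Set.add st.2 c))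
        ([], PySem.Set.empty) from rfl]
  rfl

lemma solve_alt_eq (s : String) :
    solve_alt s = (pvB2 (pvRv s.toList) (PySem.List.enumerate s.toList 0)).1 := rfl

lemma pv_solve_eq_alt (s : String) : solve s = solve_alt s := by
  rw [solve_eq, solve_alt_eq]
  rcases hcs : s.toList with _ | ⟨c0, t⟩
  · simp [pvA2, pvB2, PySem.List.enumerate_nil]
  · have hne : s.toList ≠ [] := by rw [hcs]; simp
    rw [← hcs]
    set cs := s.toList with hdef
    have hn : 1 ≤ cs.length := by
      rw [hcs]; simp
    have Hub : ∀ j (h : j < cs.length),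
        (j : Int) ≤ pvRv cs cs[j] ∧ pvRv cs cs[j] ≤ (cs.length : Int) - 1 := by
      intro j hj
      obtain ⟨k, hk, hck, hmax, hget⟩ :=
        pvRight_last cs 0 PySem.Dict.empty cs[j] (List.getElem_mem hj)
      have : pvRv cs cs[j] = (k : Int) := by
        unfold pvRv
        rw [PySem.Dict.getD_of_get?_eq_some _ 0 hget]
        omega
      rw [this]
      have := hmax j hj rfl
      omega
    have Hlv : ∀ k (h : k < cs.length), cs[k] ∉ cs.take k → pvLv cs cs[k] = (k : Int) := by
      intro k hk hnin
      obtain ⟨k', hk', hck', hnin', hget⟩ :=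
        pvLeft_first cs 0 PySem.Dict.empty cs[k] (by simp [PySem.Dict.contains_empty])
          (List.getElem_mem hk)
      have hkk : k' = k := pvFirstUnique cs k' k hk' hk (by rw [hck']) (hck' ▸ hnin') hnin
      unfold pvLv
      rw [PySem.Dict.getD_of_get?_eq_some _ 0 hget]
      omega
    obtain ⟨-, -, hlb, hub, segs, top1, hstk, hif⟩ :=
      pvInv cs (pvLv cs) (pvRv cs) Hub Hlv cs.length hn le_rfl
    rw [List.take_length] at hstk hif hlb hub
    have hen : (pvB2 (pvRv cs) (PySem.List.enumerate cs 0)).2.2 = (cs.length : Int) - 1 := by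
      omega
    rw [if_pos hen] at hif
    rw [hstk, List.map_append]
    rw [hif.1]
    simp [pvLenF]

-- ===== VERDICT (by name: the statement is the Claim_ definition above) =====
theorem solve_spec : Claim_equal_solve := by
  intro s _
  unfold Spec_solve
  exact pv_solve_eq_alt s
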